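-- pv_equiv track=rewrite | github.com/Kam300/vue_project | backend/ссс.py | group_by_generation
-- ===== SOURCE A (Python) =====
-- def group_by_generation(members):
--     gens = {
--         "grandparents": [],
--         "parents": [],
--         "uncles": [],
--         "children": [],
--         "nephews": [],
--         "grandchildren": [],
--         "other": [],
--     }
--     rolemap = {
--         "GRANDFATHER": "grandparents",
--         "GRANDMOTHER": "grandparents",
--         "FATHER": "parents",
--         "MOTHER": "parents",
--         "UNCLE": "uncles",
--         "AUNT": "uncles",
--         "SON": "children",
--         "DAUGHTER": "children",
--         "BROTHER": "children",
--         "SISTER": "children",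
--         "NEPHEW": "nephews",
--         "NIECE": "nephews",
--         "GRANDSON": "grandchildren",
--         "GRANDDAUGHTER": "grandchildren",
--         "OTHER": "other",
--     }
--     for m in members:
--         role = (m.get("role") or "OTHER").upper()
--         gen = rolemap.get(role, "other")
--         gens[gen].append(m)
--     return gens
-- ===== SOURCE B (Python) =====
-- def group_by_generation(members):
--     rolemap = {
--         "GRANDFATHER": "grandparents",
--         "GRANDMOTHER": "grandparents",
--         "FATHER": "parents",
--         "MOTHER": "parents",
--         "UNCLE": "uncles",
--         "AUNT": "uncles",
--         "SON": "children",
--         "DAUGHTER": "children",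
--         "BROTHER": "children",
--         "SISTER": "children",
--         "NEPHEW": "nephews",
--         "NIECE": "nephews",
--         "GRANDSON": "grandchildren",
--         "GRANDDAUGHTER": "grandchildren",
--         "OTHER": "other",
--     }
--
--     def gen_of(m):
--         return rolemap.get((m.get("role") or "OTHER").upper(), "other")
--
--     order = ["grandparents", "parents", "uncles", "children",
--              "nephews", "grandchildren", "other"]
--     return {g: [m for m in members if gen_of(m) == g] for g in order}
-- ===== Notes on version B (the rewrite author's own statement) =====
-- stated objective: idiomatic
-- what changed: Replaces the mutable-buckets accumulation loop with a category-keyed dict comprehension: for each of the seven fixed generation keys, collect the members whose mapped generation equals that key (one scan per category instead of one pass appending into pre-built buckets).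
import Mathlib
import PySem

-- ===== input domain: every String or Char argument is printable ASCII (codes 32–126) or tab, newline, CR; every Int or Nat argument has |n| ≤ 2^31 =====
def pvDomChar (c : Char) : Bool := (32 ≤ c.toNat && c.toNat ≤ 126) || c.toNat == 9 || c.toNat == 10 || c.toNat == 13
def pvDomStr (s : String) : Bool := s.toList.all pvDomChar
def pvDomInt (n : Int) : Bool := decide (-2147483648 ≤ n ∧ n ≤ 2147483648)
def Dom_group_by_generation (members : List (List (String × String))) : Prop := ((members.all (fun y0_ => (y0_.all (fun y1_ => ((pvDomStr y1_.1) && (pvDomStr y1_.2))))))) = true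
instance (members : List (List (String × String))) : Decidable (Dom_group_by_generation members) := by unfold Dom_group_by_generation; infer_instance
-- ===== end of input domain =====

-- B replaces A's single mutable-buckets accumulation loop by an idiomatic
-- category-keyed comprehension: one filter scan per fixed generation key.


-- ===== PORT A =====
def group_by_generation (members : List (List (String × String))) : List (String × List (List (String × String))) :=
  let gens : PySem.Dict String (List (List (String × String))) :=
    PySem.Dict.ofList [("grandparents", []), ("parents", []), ("uncles", []),
      ("children", []), ("nephews", []), ("grandchildren", []), ("other", [])]
  let rolemap : PySem.Dict String String :=
    PySem.Dict.ofList [("GRANDFATHER", "grandparents"), ("GRANDMOTHER", "grandparents"),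
      ("FATHER", "parents"), ("MOTHER", "parents"), ("UNCLE", "uncles"), ("AUNT", "uncles"),
      ("SON", "children"), ("DAUGHTER", "children"), ("BROTHER", "children"), ("SISTER", "children"),
      ("NEPHEW", "nephews"), ("NIECE", "nephews"), ("GRANDSON", "grandchildren"),
      ("GRANDDAUGHTER", "grandchildren"), ("OTHER", "other")]
  let final := members.foldl (fun d m =>
    -- role = (m.get("role") or "OTHER").upper()  ('or' treats "" and missing as falsy)
    let role := PySem.Str.upper (match (PySem.Dict.mk m).get? "role" with
      | some s => if s = "" then "OTHER" else s
      | none => "OTHER")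
    let gen := rolemap.getD role "other"
    -- gens[gen].append(m): gen is always one of gens' seven keys, so modify-with-default [] is exact
    d.modify gen [] (fun l => l ++ [m])) gens
  final.items

-- ===== PORT B =====
def pvRolemapB : PySem.Dict String String :=
  PySem.Dict.ofList [("GRANDFATHER", "grandparents"), ("GRANDMOTHER", "grandparents"),
    ("FATHER", "parents"), ("MOTHER", "parents"), ("UNCLE", "uncles"), ("AUNT", "uncles"),
    ("SON", "children"), ("DAUGHTER", "children"), ("BROTHER", "children"), ("SISTER", "children"),
    ("NEPHEW", "nephews"), ("NIECE", "nephews"), ("GRANDSON", "grandchildren"),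
    ("GRANDDAUGHTER", "grandchildren"), ("OTHER", "other")]

def pvGenOf (m : List (String × String)) : String :=
  pvRolemapB.getD (PySem.Str.upper (match (PySem.Dict.mk m).get? "role" with
    | some s => if s = "" then "OTHER" else s
    | none => "OTHER")) "other"

def pvOrder : List String :=
  ["grandparents", "parents", "uncles", "children", "nephews", "grandchildren", "other"]

def group_by_generation_alt (members : List (List (String × String))) : List (String × List (List (String × String))) :=
  pvOrder.map (fun g => (g, members.filter (fun m => pvGenOf m == g)))

-- ===== PRECONDITION & SPEC =====
def Spec_group_by_generation (members : List (List (String × String))) (out : List (String × List (List (String × String)))) : Prop := out = group_by_generation_alt members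
instance (members : List (List (String × String))) (out : List (String × List (List (String × String)))) : Decidable (Spec_group_by_generation members out) := by unfold Spec_group_by_generation; infer_instance

-- ===== CLAIM (what is proved, stated in full; the proofs are below) =====
def Claim_equal_group_by_generation : Prop := ∀ (members : List (List (String × String))), Dom_group_by_generation members → Spec_group_by_generation members (group_by_generation members)

-- ===== LEMMAS AND PROOFS =====

-- proof-only helper: A's initial buckets dict, named for the lemmas below
def pvGens0 : PySem.Dict String (List (List (String × String))) :=
  PySem.Dict.ofList [("grandparents", []), ("parents", []), ("uncles", []),
    ("children", []), ("nephews", []), ("grandchildren", []), ("other", [])]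

-- the mapped generation is always one of the seven bucket keys
lemma pvGenOf_mem (m : List (String × String)) : pvGenOf m ∈ pvOrder := by
  unfold pvGenOf
  rw [PySem.Dict.getD_eq_get?_getD]
  cases h : pvRolemapB.get? (PySem.Str.upper (match (PySem.Dict.mk m).get? "role" with
      | some s => if s = "" then "OTHER" else s
      | none => "OTHER")) with
  | none => simp [pvOrder]
  | some v =>
    have hv := PySem.Dict.mem_items_of_get?_eq_some _ h
    have hv2 : v ∈ pvRolemapB.items.map Prod.snd := List.mem_map_of_mem hv
    rw [show pvRolemapB.items.map Prod.snd
        = ["grandparents", "grandparents", "parents", "parents", "uncles", "uncles",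
           "children", "children", "children", "children", "nephews", "nephews",
           "grandchildren", "grandchildren", "other"] from rfl] at hv2
    simp only [Option.getD_some]
    fin_cases hv2 <;> decide

-- a dict with Nodup keys is its keys paired with their getD values
lemma items_eq_map_keys {ν : Type} (d : PySem.Dict String ν) (d0 : ν)
    (h : d.keys.Nodup) : d.items = d.keys.map (fun k => (k, d.getD k d0)) := by
  obtain ⟨l⟩ := d
  induction l with
  | nil => rfl
  | cons p rest ih =>
    obtain ⟨k, v⟩ := p
    have hk : k ∉ rest.map Prod.fst ∧ (rest.map Prod.fst).Nodup := by
      simpa [PySem.Dict.keys] using h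
    show (k, v) :: rest
      = (((k, v) :: rest).map Prod.fst).map (fun x => (x, (PySem.Dict.mk ((k, v) :: rest)).getD x d0))
    rw [List.map_cons, List.map_cons]
    congr 1
    · rw [PySem.Dict.getD_eq_get?_getD, PySem.Dict.get?_mk_cons]
      simp
    · have htail : ∀ x ∈ rest.map Prod.fst,
          (PySem.Dict.mk ((k, v) :: rest)).getD x d0 = (PySem.Dict.mk rest).getD x d0 := by
        intro x hx
        have hne : (k == x) = false := by
          simp only [beq_eq_false_iff_ne, ne_eq]
          exact fun he => hk.1 (he ▸ hx)
        rw [PySem.Dict.getD_eq_get?_getD, PySem.Dict.get?_mk_cons, hne]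
        simp [PySem.Dict.getD_eq_get?_getD]
      refine (ih hk.2).trans (List.map_congr_left ?_)
      intro x hx
      rw [htail x hx]

-- projecting the (key, member) pairs back after filtering by key
lemma map_snd_filter_fst (g : String) (members : List (List (String × String))) :
    ((members.map (fun m => (pvGenOf m, m))).filter (fun p => p.1 == g)).map (fun p => p.2)
      = members.filter (fun m => pvGenOf m == g) := by
  induction members with
  | nil => rfl
  | cons a t ih =>
    by_cases hc : pvGenOf a = g <;> simp [hc, ih]

lemma fold_eq (members : List (List (String × String)))
    (d : PySem.Dict String (List (List (String × String)))) :
    members.foldl (fun d m => d.modify (pvGenOf m) [] (fun l => l ++ [m])) d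
      = (members.map (fun m => (pvGenOf m, m))).foldl
          (fun d p => d.modify p.1 [] (fun l => l ++ [p.2])) d := by
  rw [List.foldl_map]

-- ===== VERDICT (by name: the statement is the Claim_ definition above) =====
theorem group_by_generation_spec : Claim_equal_group_by_generation := by
  intro members _
  show group_by_generation members = group_by_generation_alt members
  have hA : group_by_generation members
      = (members.foldl (fun d m => d.modify (pvGenOf m) [] (fun l => l ++ [m])) pvGens0).items := rfl
  rw [hA]
  set D := members.foldl (fun d m => d.modify (pvGenOf m) [] (fun l => l ++ [m])) pvGens0 with hD
  have hkeys : D.keys = pvOrder := by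
    rw [hD, fold_eq, PySem.Dict.keys_foldl_modify_key, PySem.Set.update_eq_append_filter]
    have hmem : ∀ g ∈ PySem.Set.ofList ((members.map (fun m => (pvGenOf m, m))).map Prod.fst),
        PySem.Set.contains pvGens0.keys g = true := by
      intro g hg
      rw [PySem.Set.mem_ofList] at hg
      simp only [List.map_map, List.mem_map] at hg
      obtain ⟨m, _, hm⟩ := hg
      rw [PySem.Set.contains_iff, show pvGens0.keys = pvOrder from rfl, ← hm]
      exact pvGenOf_mem m
    rw [List.filter_eq_nil_iff.mpr ?_, List.append_nil]
    · rfl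
    · intro g hg
      simp
      exact (PySem.Set.contains_iff _ _).mp (hmem g hg)
  have hget : ∀ g, D.getD g [] = pvGens0.getD g [] ++ members.filter (fun m => pvGenOf m == g) := by
    intro g
    rw [hD, fold_eq, PySem.Dict.getD_foldl_modify_append]
    congr 1
    exact map_snd_filter_fst g members
  have hzero : ∀ g ∈ pvOrder, pvGens0.getD g [] = [] := by decide
  rw [items_eq_map_keys D [] (by rw [hkeys]; decide), hkeys]
  unfold group_by_generation_alt
  apply List.map_congr_left
  intro g hg
  rw [hget g, hzero g hg, List.nil_append]
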